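-- pv_equiv track=rewrite | github.com/nnmeli/PythonBasics | PythonBasics( #0 to #4 )/#3.py | problem8
-- ===== SOURCE A (Python) =====
-- def problem8(x,y):
--     yan_sublar=[]
--     dik_sublar=[]
--     for i in x :
--         a=[]
--         for k in i :
--             a.append(k)
--             yan_sublar.append(a.copy())
--     c=0
--     b=[]
--     while c<len(x[0]) :
--         b=[]
--         for i in x:
--             b.append(i[c])
--             dik_sublar.append(b.copy())
--         c+=1
--
--     tum_sublar=yan_sublar + dik_sublar
--
--     for i in range(len(y)):
--         if y[i] not in tum_sublar :
--             return False
--     return True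
-- ===== SOURCE B (Python) =====
-- def problem8(x, y):
--     ncols = len(x[0])
--
--     def ok(q):
--         n = len(q)
--         if n == 0:
--             return False
--         if any(q == row[:n] for row in x):
--             return True
--         return n <= len(x) and any(q == [row[j] for row in x[:n]] for j in range(ncols))
--
--     return all(ok(q) for q in y)
-- ===== Notes on version B (the rewrite author's own statement) =====
-- stated objective: faster
-- what changed: B drops A's precomputed list of all row/column prefixes (quadratic in the grid size) and instead tests each query q of y directly against row prefixes row[:len(q)] and column prefixes built only to length len(q).
import Mathlib
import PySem

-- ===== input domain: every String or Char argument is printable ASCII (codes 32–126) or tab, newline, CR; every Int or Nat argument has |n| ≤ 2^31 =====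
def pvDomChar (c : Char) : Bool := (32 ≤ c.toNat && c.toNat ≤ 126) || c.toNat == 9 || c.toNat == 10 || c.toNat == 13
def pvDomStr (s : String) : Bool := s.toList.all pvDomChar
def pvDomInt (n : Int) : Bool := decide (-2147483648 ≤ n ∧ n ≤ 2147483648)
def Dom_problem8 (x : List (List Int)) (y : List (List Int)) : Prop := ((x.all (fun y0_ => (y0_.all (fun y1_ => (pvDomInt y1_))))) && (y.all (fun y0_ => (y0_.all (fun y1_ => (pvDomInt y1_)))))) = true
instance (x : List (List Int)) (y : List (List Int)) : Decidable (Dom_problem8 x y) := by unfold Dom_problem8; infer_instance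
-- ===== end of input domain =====

-- B replaces A's precomputed table of every row/column prefix by a direct per-query
-- test of each element of y against row prefixes and column prefixes of its own length (faster).

-- ===== PORT A =====
-- append k to the running prefix and record a copy (a.append(k); list.append(a.copy()))
def pvStep (s : List Int × List (List Int)) (k : Int) : List Int × List (List Int) :=
  (s.1 ++ [k], s.2 ++ [s.1 ++ [k]])

def problem8 (x : List (List Int)) (y : List (List Int)) : Bool :=
  let yan := x.foldl (fun acc i => (i.foldl pvStep ([], acc)).2) []
  -- len(x[0]); under Pre_problem8 the index is in range (getD is never taken)
  let ncols := ((PySem.List.pyGet? x 0).getD []).length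
  -- while c < ncols: b=[]; for i in x: b.append(i[c]); dik.append(b.copy())
  let dik := (List.range ncols).foldl (fun acc c =>
      (x.foldl (fun s i => pvStep s ((PySem.List.pyGet? i (Int.ofNat c)).getD 0)) ([], acc)).2) []
  let tum := yan ++ dik
  y.all (fun q => decide (q ∈ tum))

-- ===== PORT B =====
def problem8_alt (x : List (List Int)) (y : List (List Int)) : Bool :=
  let ncols := ((PySem.List.pyGet? x 0).getD []).length
  y.all (fun q =>
    let n := q.length
    if n = 0 then false
    else if x.any (fun row => q == row.take n) then true
    else decide (n ≤ x.length) &&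
      (List.range ncols).any (fun j =>
        q == (x.take n).map (fun row => (PySem.List.pyGet? row (Int.ofNat j)).getD 0)))

-- ===== PRECONDITION & SPEC =====
-- Pre_ excludes exactly the inputs where Python A raises IndexError: empty x (x[0]),
-- or some row shorter than len(x[0]) (i[c] in the column loop).
def Pre_problem8 (x : List (List Int)) (y : List (List Int)) : Prop :=
  x ≠ [] ∧ ∀ row ∈ x, (x.headD []).length ≤ row.length
instance (x : List (List Int)) (y : List (List Int)) : Decidable (Pre_problem8 x y) := by
  unfold Pre_problem8; infer_instance
def pvWitness_problem8 : List (List Int) × List (List Int) :=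
  ([[1, 2], [3, 4]], [[1], [1, 3]])

def Spec_problem8 (x : List (List Int)) (y : List (List Int)) (out : Bool) : Prop := out = problem8_alt x y
instance (x : List (List Int)) (y : List (List Int)) (out : Bool) : Decidable (Spec_problem8 x y out) := by unfold Spec_problem8; infer_instance

-- ===== CLAIM (what is proved, stated in full; the proofs are below) =====
def Claim_equal_problem8 : Prop := ∀ (x : List (List Int)) (y : List (List Int)), Dom_problem8 x y → Pre_problem8 x y → Spec_problem8 x y (problem8 x y)

-- ===== LEMMAS AND PROOFS =====

-- the nonempty prefixes of l, shortest first
def prefs (l : List Int) : List (List Int) := (List.range l.length).map (fun t => l.take (t + 1))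

theorem all_congr' {α : Type} (l : List α) (f g : α → Bool) (h : ∀ a ∈ l, f a = g a) :
    l.all f = l.all g := by
  induction l with
  | nil => rfl
  | cons a l ih => simp only [List.all_cons, h a (by simp), ih (fun b hb => h b (by simp [hb]))]

theorem foldl_pvStep (l : List Int) (a : List Int) (acc : List (List Int)) :
    l.foldl pvStep (a, acc) = (a ++ l, acc ++ (List.range l.length).map (fun t => a ++ l.take (t + 1))) := by
  induction l generalizing a acc with
  | nil => simp
  | cons k l ih =>
      simp only [List.foldl_cons, pvStep]
      rw [ih]
      refine Prod.ext (by simp) ?_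
      simp only [List.length_cons, List.range_succ_eq_map]
      simp [List.map_map, Function.comp_def, List.append_assoc]

theorem mem_prefs (q l : List Int) :
    q ∈ prefs l ↔ q ≠ [] ∧ q = l.take q.length := by
  unfold prefs
  simp only [List.mem_map, List.mem_range]
  constructor
  · rintro ⟨t, ht, rfl⟩
    have hlen : (l.take (t + 1)).length = t + 1 := by simp; omega
    constructor
    · intro h; rw [h] at hlen; simp at hlen
    · rw [hlen]
  · rintro ⟨hne, hq⟩
    have h1 : 1 ≤ q.length := by
      cases q with
      | nil => exact absurd rfl hne
      | cons a l => simp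
    have hle : q.length ≤ l.length := by
      have := congrArg List.length hq
      simp at this; omega
    refine ⟨q.length - 1, by omega, ?_⟩
    have he : q.length - 1 + 1 = q.length := by omega
    rw [he]; exact hq.symm

theorem yan_eq (x : List (List Int)) :
    x.foldl (fun acc i => (i.foldl pvStep ([], acc)).2) [] = x.flatMap prefs := by
  suffices h : ∀ acc, x.foldl (fun acc i => (i.foldl pvStep ([], acc)).2) acc = acc ++ x.flatMap prefs by
    simpa using h []
  induction x with
  | nil => simp
  | cons i x ih =>
      intro acc
      rw [List.foldl_cons]
      have h2 : (List.foldl pvStep ([], acc) i).2 = acc ++ prefs i := by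
        rw [foldl_pvStep]; simp [prefs]
      rw [h2, ih, List.flatMap_cons, List.append_assoc]

theorem dik_eq (x : List (List Int)) (ncols : Nat) :
    (List.range ncols).foldl (fun acc c =>
        (x.foldl (fun s i => pvStep s ((PySem.List.pyGet? i (Int.ofNat c)).getD 0)) ([], acc)).2) []
      = (List.range ncols).flatMap (fun c => prefs (x.map (fun i => (PySem.List.pyGet? i (Int.ofNat c)).getD 0))) := by
  suffices h : ∀ (L : List Nat) acc, L.foldl (fun acc c =>
        (x.foldl (fun s i => pvStep s ((PySem.List.pyGet? i (Int.ofNat c)).getD 0)) ([], acc)).2) acc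
      = acc ++ L.flatMap (fun c => prefs (x.map (fun i => (PySem.List.pyGet? i (Int.ofNat c)).getD 0))) by
    simpa using h (List.range ncols) []
  intro L
  induction L with
  | nil => simp
  | cons c L ih =>
      intro acc
      rw [List.foldl_cons]
      have h2 : (x.foldl (fun s i => pvStep s ((PySem.List.pyGet? i (Int.ofNat c)).getD 0)) ([], acc)).2
          = acc ++ prefs (x.map (fun i => (PySem.List.pyGet? i (Int.ofNat c)).getD 0)) := by
        rw [← List.foldl_map, foldl_pvStep]
        simp [prefs]
      rw [h2, ih, List.flatMap_cons, List.append_assoc]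

-- the per-query agreement: q ∈ tum_sublar equals B's direct test
theorem per_query (x : List (List Int)) (q : List Int) (ncols : Nat) :
    decide (q ∈ x.flatMap prefs ++
        (List.range ncols).flatMap (fun c => prefs (x.map (fun i => (PySem.List.pyGet? i (Int.ofNat c)).getD 0))))
      = (if q.length = 0 then false
         else if x.any (fun row => q == row.take q.length) then true
         else decide (q.length ≤ x.length) &&
           (List.range ncols).any (fun j =>
             q == (x.take q.length).map (fun row => (PySem.List.pyGet? row (Int.ofNat j)).getD 0))) := by
  by_cases hq : q = []
  · subst hq
    have : ∀ L : List (List Int), ([] : List Int) ∈ L.flatMap prefs → False := by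
      intro L h
      simp only [List.mem_flatMap, mem_prefs] at h
      obtain ⟨a, _, h, _⟩ := h
      exact h rfl
    have h0 : ([] : List Int).length = 0 := by simp
    rw [if_pos h0]
    simp only [decide_eq_false_iff_not, List.mem_append]
    rintro (h | h)
    · exact this x h
    · simp only [List.mem_flatMap, mem_prefs, List.mem_range] at h
      obtain ⟨c, _, h, _⟩ := h
      exact h rfl
  · have hne : ¬ q.length = 0 := by simpa using hq
    rw [if_neg hne]
    by_cases hrow : x.any (fun row => q == row.take q.length)
    · rw [if_pos hrow]
      simp only [List.any_eq_true, beq_iff_eq] at hrow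
      obtain ⟨row, hrm, hrq⟩ := hrow
      simp only [decide_eq_true_eq, List.mem_append, List.mem_flatMap]
      exact Or.inl ⟨row, hrm, (mem_prefs q row).mpr ⟨hq, hrq⟩⟩
    · rw [if_neg hrow]
      simp only [List.any_eq_true, beq_iff_eq] at hrow
      rw [Bool.eq_iff_iff]
      simp only [decide_eq_true_eq, Bool.and_eq_true, List.any_eq_true, beq_iff_eq,
        List.mem_append, List.mem_flatMap, List.mem_range, mem_prefs]
      push Not at hrow
      constructor
      · rintro (⟨row, hrm, _, hrq⟩ | ⟨c, hc, _, hqc⟩)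
        · exact absurd hrq (hrow row hrm)
        · have hlen : q.length ≤ x.length := by
            have := congrArg List.length hqc
            simp at this; omega
          exact ⟨by simpa using hlen, c, hc, hqc.trans (by rw [List.map_take])⟩
      · rintro ⟨_, c, hc, hqc⟩
        exact Or.inr ⟨c, hc, hq, hqc.trans (by rw [List.map_take])⟩

-- ===== VERDICT (by name: the statement is the Claim_ definition above) =====
theorem problem8_spec : Claim_equal_problem8 := by
  intro x y _ _
  unfold Spec_problem8 problem8 problem8_alt
  simp only [yan_eq, dik_eq]
  exact all_congr' y _ _ (fun q _ => per_query x q _)
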